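-- pv_equiv track=rewrite | github.com/shastrihm/DemandAwareSkipGraphs | generator.py | n_cluster_demand_dict
-- ===== SOURCE A (Python) =====
-- def init_dict(n):
--     """
--     Initialize blank dictionary with request pairs as keys
--     """
--     D = {(u,v): 0 for u,v in [(a,b) for a in list(range(n)) for b in list(range(n))]}
--     assert(len(D) == n**2)
--     return D
--
-- def n_cluster_demand_dict(n, clusters):
--     """
--     D[(u,v)] += 1 if and only if they are in the same cluster, as determined by clusters.
--     Clusters is a list of lists, where cluster[i] is a list of keys.
--     A more general version of 2 cluster. Can also handle nested
--     clusters (clusters within clusters) -- these nested clusters will have weight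
--     D[(u,v)] equal to their depth in the base cluster.
--         E.g. if [[1,2,3,4], [2,3,4], [2,4]] are clusters, then, for example,
--         D[(1,3)] = 1,
--         D[(2,3)] = 2
--         D[(2,4)] = 4
--     """
--     D = init_dict(n)
--     for cluster in clusters:
--         for u in cluster:
--             for v in cluster:
--                 if u != v:
--                     D[(u,v)] += 1
--     return D
-- ===== SOURCE B (Python) =====
-- def n_cluster_demand_dict(n, clusters):
--     # Aggregate each cluster's value-frequency table into a sparse pair dict P,
--     # then build the result directly pair by pair: D[(a,b)] = P.get((a,b), 0).
--     P = {}
--     for c in clusters: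
--         t = {}
--         for x in c:
--             t[x] = t.get(x, 0) + 1
--         for u, cu in t.items():
--             for v, cv in t.items():
--                 if u != v:
--                     P[(u, v)] = P.get((u, v), 0) + cu * cv
--     return {(a, b): P.get((a, b), 0) for a in range(n) for b in range(n)}
-- ===== Notes on version B (the rewrite author's own statement) =====
-- stated objective: alternative
-- what changed: B never walks ordered position pairs of a cluster: it counts each cluster's values once, accumulates count(u)*count(v) per ordered pair of distinct values into a sparse dict, and then builds the result directly as a comprehension over range(n)^2 with a lookup, instead of A's triple loop incrementing a pre-zeroed full dict once per position pair.
import Mathlib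
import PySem

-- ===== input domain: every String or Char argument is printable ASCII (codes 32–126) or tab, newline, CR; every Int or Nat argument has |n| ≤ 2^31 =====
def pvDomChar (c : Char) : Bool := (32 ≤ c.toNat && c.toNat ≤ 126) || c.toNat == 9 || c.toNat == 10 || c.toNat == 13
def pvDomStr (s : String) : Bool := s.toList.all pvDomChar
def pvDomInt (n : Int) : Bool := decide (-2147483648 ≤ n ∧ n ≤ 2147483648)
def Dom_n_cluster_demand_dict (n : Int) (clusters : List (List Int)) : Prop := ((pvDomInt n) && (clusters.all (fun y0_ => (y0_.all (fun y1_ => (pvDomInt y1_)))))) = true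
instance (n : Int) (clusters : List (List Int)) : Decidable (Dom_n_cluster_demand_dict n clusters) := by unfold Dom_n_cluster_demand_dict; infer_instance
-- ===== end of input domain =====

-- B counts each cluster's values once, accumulates count(u)*count(v) per ordered pair of
-- distinct values into a sparse pair dict, and builds the result directly over range(n)²
-- with a lookup, instead of A's triple loop over position pairs (objective: alternative).

-- ===== PORT A =====
-- init_dict(n): {(u,v): 0 for a,b in range(n)×range(n)} (the assert only fails for n < 0, excluded by Pre_)
def pvInitDict (n : Int) : PySem.Dict (Int × Int) Int :=
  PySem.Dict.ofList
    (((PySem.List.pyRange 0 n).flatMap (fun a => (PySem.List.pyRange 0 n).map (fun b => (a, b)))).map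
      (fun p => (p, (0 : Int))))

def n_cluster_demand_dict (n : Int) (clusters : List (List Int)) : List (Int × Int × Int) :=
  (clusters.foldl (fun D cluster =>
    cluster.foldl (fun D u =>
      cluster.foldl (fun D v =>
        if u ≠ v then D.modify (u, v) 0 (· + 1) else D) D) D) (pvInitDict n)).items.map
    (fun p => (p.1.1, p.1.2, p.2))

-- ===== PORT B =====
-- the per-cluster frequency table t (t[x] = t.get(x,0)+1 over the cluster)
def pvCountTable (c : List Int) : PySem.Dict Int Int :=
  c.foldl (fun t x => t.insert x (t.getD x 0 + 1)) PySem.Dict.empty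

def n_cluster_demand_dict_alt (n : Int) (clusters : List (List Int)) : List (Int × Int × Int) :=
  let P := clusters.foldl (fun P c =>
    let t := pvCountTable c
    t.items.foldl (fun P p =>
      t.items.foldl (fun P q =>
        if p.1 ≠ q.1 then P.modify (p.1, q.1) 0 (· + p.2 * q.2) else P) P) P)
    PySem.Dict.empty
  (PySem.List.pyRange 0 n).flatMap (fun a =>
    (PySem.List.pyRange 0 n).map (fun b => (a, b, P.getD (a, b) 0)))

-- ===== PRECONDITION & SPEC =====
-- Pre_ excludes exactly the inputs where Python A raises: n < 0 fails init_dict's assert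
-- (len(D) = 0 ≠ n**2), and a cluster holding two distinct values with either outside
-- range(n) raises KeyError on D[(u,v)] += 1.
def Pre_n_cluster_demand_dict (n : Int) (clusters : List (List Int)) : Prop :=
  0 ≤ n ∧ ∀ c ∈ clusters, ∀ u ∈ c, ∀ v ∈ c, u ≠ v → (0 ≤ u ∧ u < n ∧ 0 ≤ v ∧ v < n)
instance (n : Int) (clusters : List (List Int)) : Decidable (Pre_n_cluster_demand_dict n clusters) := by
  unfold Pre_n_cluster_demand_dict; infer_instance

def pvWitness_n_cluster_demand_dict : Int × List (List Int) := (6, [[0, 1, 2], [1, 3, 3], [4, 2], [5, 0]])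


def Spec_n_cluster_demand_dict (n : Int) (clusters : List (List Int)) (out : List (Int × Int × Int)) : Prop := out = n_cluster_demand_dict_alt n clusters
instance (n : Int) (clusters : List (List Int)) (out : List (Int × Int × Int)) : Decidable (Spec_n_cluster_demand_dict n clusters out) := by unfold Spec_n_cluster_demand_dict; infer_instance

-- ===== CLAIM (what is proved, stated in full; the proofs are below) =====
def Claim_equal_n_cluster_demand_dict : Prop := ∀ (n : Int) (clusters : List (List Int)), Dom_n_cluster_demand_dict n clusters → Pre_n_cluster_demand_dict n clusters → Spec_n_cluster_demand_dict n clusters (n_cluster_demand_dict n clusters)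

-- ===== LEMMAS AND PROOFS =====

-- the per-cluster loop body of A's port, as a named function (defeq to the port's lambda)
def pvBodyA (D : PySem.Dict (Int × Int) Int) (cluster : List Int) : PySem.Dict (Int × Int) Int :=
  cluster.foldl (fun D u =>
    cluster.foldl (fun D v =>
      if u ≠ v then D.modify (u, v) 0 (· + 1) else D) D) D

-- the key list of init_dict, before pairing with 0
def pvPairs (n : Int) : List (Int × Int) :=
  (PySem.List.pyRange 0 n).flatMap (fun a => (PySem.List.pyRange 0 n).map (fun b => (a, b)))

-- a fold whose every step adds g x to the value at key k adds (l.map g).sum to it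
theorem pv_foldl_getD_add {α : Type} (l : List α)
    (F : PySem.Dict (Int × Int) Int → α → PySem.Dict (Int × Int) Int) (g : α → Int) (k : Int × Int)
    (h : ∀ D x, x ∈ l → (F D x).getD k 0 = D.getD k 0 + g x) :
    ∀ D, (l.foldl F D).getD k 0 = D.getD k 0 + (l.map g).sum := by
  induction l with
  | nil => simp
  | cons x t ih =>
    intro D
    simp only [List.foldl_cons, List.map_cons, List.sum_cons]
    rw [ih (fun D y hy => h D y (List.mem_cons_of_mem _ hy)),
        h D x List.mem_cons_self]
    ring

theorem pv_sum_ite_const (l : List Int) (a k : Int) :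
    (l.map fun x => if x = a then k else 0).sum = (l.count a : Int) * k := by
  induction l with
  | nil => simp
  | cons x t ih =>
    simp only [List.map_cons, List.sum_cons, ih, List.count_cons]
    by_cases h : x = a
    · simp [h]; ring
    · simp [h]

-- one modify step, seen at an arbitrary key (u, v)
theorem pv_step (a b t u v : Int) (D : PySem.Dict (Int × Int) Int) :
    (if a ≠ b then D.modify (a, b) 0 (· + t) else D).getD (u, v) 0
      = D.getD (u, v) 0 + (if a = u ∧ b = v ∧ u ≠ v then t else 0) := by
  by_cases h1 : a ≠ b
  · simp only [if_pos h1, PySem.Dict.getD_modify]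
    by_cases h2 : a = u <;> by_cases h3 : b = v <;>
      simp [h2, h3, Prod.ext_iff] <;> simp_all <;> omega
  · rw [if_neg h1, if_neg (fun h => h.2.2 (h.1 ▸ h.2.1 ▸ not_not.mp h1)), add_zero]

theorem pv_innerA (u0 : Int) (l : List Int) (u v : Int) (D : PySem.Dict (Int × Int) Int) :
    (l.foldl (fun D v' => if u0 ≠ v' then D.modify (u0, v') 0 (· + 1) else D) D).getD (u, v) 0
      = D.getD (u, v) 0 + (if u0 = u ∧ u ≠ v then (l.count v : Int) else 0) := by
  rw [pv_foldl_getD_add l _ (fun x => if u0 = u ∧ x = v ∧ u ≠ v then 1 else 0) (u, v)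
      (fun D x _ => pv_step u0 x 1 u v D) D]
  congr 1
  by_cases h1 : u0 = u <;> by_cases h2 : u ≠ v <;> simp [h1, h2]
  rw [pv_sum_ite_const l v 1, mul_one]

theorem pv_getD_A (cluster : List Int) (D : PySem.Dict (Int × Int) Int) (u v : Int) :
    (pvBodyA D cluster).getD (u, v) 0
      = D.getD (u, v) 0 + (if u ≠ v then (cluster.count u : Int) * (cluster.count v : Int) else 0) := by
  unfold pvBodyA
  rw [pv_foldl_getD_add cluster _
      (fun u' => if u' = u ∧ u ≠ v then (cluster.count v : Int) else 0) (u, v)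
      (fun D x _ => pv_innerA x cluster u v D) D]
  congr 1
  by_cases h2 : u ≠ v <;> simp [h2]
  rw [pv_sum_ite_const cluster u ((cluster.count v : Int))]

-- every value inserted by init_dict is 0, so every lookup is 0
theorem pv_init_getD_aux (l : List (Int × Int)) :
    ∀ D : PySem.Dict (Int × Int) Int, (∀ k, D.getD k 0 = 0) →
      ∀ k, ((l.map (fun p => (p, (0 : Int)))).foldl (fun d p => d.insert p.1 p.2) D).getD k 0 = 0 := by
  induction l with
  | nil => intro D h k; exact h k
  | cons x t ih =>
    intro D h k
    simp only [List.map_cons, List.foldl_cons]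
    refine ih _ (fun k' => ?_) k
    rw [PySem.Dict.getD_insert]
    split_ifs with h1
    · rfl
    · exact h k'

theorem pv_init_getD (n : Int) (k : Int × Int) : (pvInitDict n).getD k 0 = 0 :=
  pv_init_getD_aux (pvPairs n) PySem.Dict.empty (fun k => PySem.Dict.getD_empty k 0) k

theorem pv_pairs_nodup (n : Int) : (pvPairs n).Nodup := by
  have h := List.Nodup.product (PySem.List.nodup_pyRange_one 0 n) (PySem.List.nodup_pyRange_one 0 n)
  simpa [pvPairs, SProd.sprod, List.product] using h

theorem pv_keys_init (n : Int) : (pvInitDict n).keys = pvPairs n := by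
  have h := PySem.Dict.keys_foldl_insert_key (ν := Int)
      (l := (pvPairs n).map (fun p => (p, (0 : Int))))
      (key := Prod.fst) (f := fun _ p => p.2) (d := PySem.Dict.empty)
  have hk : (pvInitDict n).keys
      = PySem.Set.ofList (((pvPairs n).map (fun p => (p, (0 : Int)))).map Prod.fst) := by
    simpa [PySem.Dict.keys_empty, PySem.Set.update_nil_left] using h
  rw [hk, List.map_map]
  have : ((pvPairs n).map (Prod.fst ∘ fun p => (p, (0 : Int)))) = pvPairs n := by
    simp [Function.comp_def]
  rw [this]
  exact PySem.Set.ofList_eq_self_of_nodup _ (pv_pairs_nodup n)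

theorem pv_mem_pairs (n u v : Int) :
    (u, v) ∈ pvPairs n ↔ (0 ≤ u ∧ u < n ∧ 0 ≤ v ∧ v < n) := by
  simp [pvPairs, List.mem_flatMap, PySem.List.mem_pyRange_one, Prod.ext_iff]
  omega

theorem pv_modify_keys_of_mem (D : PySem.Dict (Int × Int) Int) (k : Int × Int)
    (h : k ∈ D.keys) (f : Int → Int) : (D.modify k 0 f).keys = D.keys := by
  rw [PySem.Dict.keys_modify]
  exact PySem.Dict.keys_insert_of_contains _ _ ((PySem.Dict.contains_iff_mem_keys _ _).mpr h)

theorem pv_keys_pres {α : Type} (l : List α)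
    (F : PySem.Dict (Int × Int) Int → α → PySem.Dict (Int × Int) Int) (K : List (Int × Int))
    (h : ∀ D x, x ∈ l → D.keys = K → (F D x).keys = K) :
    ∀ D, D.keys = K → (l.foldl F D).keys = K := by
  induction l with
  | nil => intro D hD; exact hD
  | cons x t ih =>
    intro D hD
    exact ih (fun D y hy => h D y (List.mem_cons_of_mem _ hy)) _ (h D x List.mem_cons_self hD)

theorem pv_step_keys (a b : Int) (t : Int) (D : PySem.Dict (Int × Int) Int) (K : List (Int × Int))
    (hK : D.keys = K) (hin : a ≠ b → (a, b) ∈ K) :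
    (if a ≠ b then D.modify (a, b) 0 (· + t) else D).keys = K := by
  split_ifs with h1
  · rw [pv_modify_keys_of_mem D (a, b) (hK ▸ hin h1) _]; exact hK
  · exact hK

theorem pv_keys_A (n : Int) (clusters : List (List Int))
    (hPre : Pre_n_cluster_demand_dict n clusters) :
    (clusters.foldl pvBodyA (pvInitDict n)).keys = pvPairs n := by
  refine pv_keys_pres clusters _ _ (fun D c hc hD => ?_) _ (pv_keys_init n)
  refine pv_keys_pres c _ _ (fun D x hx hD => ?_) _ hD
  refine pv_keys_pres c _ _ (fun D y hy hD => ?_) _ hD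
  refine pv_step_keys x y 1 D _ hD (fun hne => ?_)
  exact (pv_mem_pairs n x y).mpr (hPre.2 c hc x hx y hy hne)

-- the per-cluster loop body of B's port, as a named function (defeq to the port's lambda)
def pvBodyB (P : PySem.Dict (Int × Int) Int) (c : List Int) : PySem.Dict (Int × Int) Int :=
  let t := pvCountTable c
  t.items.foldl (fun P p =>
    t.items.foldl (fun P q =>
      if p.1 ≠ q.1 then P.modify (p.1, q.1) 0 (· + p.2 * q.2) else P) P) P

theorem pv_sum_ite_mem (S : List Int) (hS : S.Nodup) (m : Int → Int) (v : Int) :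
    (S.map fun x => if x = v then m x else 0).sum = if v ∈ S then m v else 0 := by
  induction S with
  | nil => simp
  | cons x t ih =>
    obtain ⟨hx, ht⟩ := List.nodup_cons.mp hS
    simp only [List.map_cons, List.sum_cons, ih ht]
    by_cases h : v = x
    · subst h; simp [hx]
    · simp [h, Ne.symm h]

theorem pv_innerB (a c0 : Int) (L : List (Int × Int)) (u v : Int)
    (D : PySem.Dict (Int × Int) Int) :
    (L.foldl (fun D q => if a ≠ q.1 then D.modify (a, q.1) 0 (· + c0 * q.2) else D) D).getD (u, v) 0
      = D.getD (u, v) 0 + (L.map (fun q => if a = u ∧ q.1 = v ∧ u ≠ v then c0 * q.2 else 0)).sum :=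
  pv_foldl_getD_add L _ _ (u, v) (fun D q _ => pv_step a q.1 (c0 * q.2) u v D) D

theorem pv_sum_items (cluster : List Int) (a c0 u v : Int) :
    (((PySem.Set.ofList cluster).map (fun k => (k, (cluster.count k : Int)))).map
      (fun q => if a = u ∧ q.1 = v ∧ u ≠ v then c0 * q.2 else 0)).sum
      = if a = u ∧ u ≠ v then c0 * (cluster.count v : Int) else 0 := by
  rw [List.map_map]
  by_cases h1 : a = u <;> by_cases h2 : u ≠ v <;> simp [h1, h2, Function.comp_def]
  rw [pv_sum_ite_mem (PySem.Set.ofList cluster) (PySem.Set.nodup_ofList _)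
      (fun k => c0 * (cluster.count k : Int)) v]
  by_cases hv : v ∈ cluster
  · simp [PySem.Set.mem_ofList, hv]
  · simp [PySem.Set.mem_ofList, hv, List.count_eq_zero_of_not_mem hv]

theorem pv_getD_B (cluster : List Int) (D : PySem.Dict (Int × Int) Int) (u v : Int) :
    (pvBodyB D cluster).getD (u, v) 0
      = D.getD (u, v) 0 + (if u ≠ v then (cluster.count u : Int) * (cluster.count v : Int) else 0) := by
  simp only [pvBodyB, pvCountTable, PySem.Dict.foldl_insert_getD_add_one_eq_counter,
    PySem.Dict.items_counter]
  rw [pv_foldl_getD_add _ _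
      (fun p => if p.1 = u ∧ u ≠ v then p.2 * (cluster.count v : Int) else 0) (u, v)
      (fun D p _ => by rw [pv_innerB p.1 p.2 _ u v D, pv_sum_items cluster p.1 p.2 u v]) D]
  congr 1
  rw [List.map_map]
  by_cases h2 : u ≠ v <;> simp [h2, Function.comp_def]
  rw [pv_sum_ite_mem (PySem.Set.ofList cluster) (PySem.Set.nodup_ofList _)
      (fun k => (cluster.count k : Int) * (cluster.count v : Int)) u]
  by_cases hu : u ∈ cluster
  · simp [PySem.Set.mem_ofList, hu]
  · simp [PySem.Set.mem_ofList, hu, List.count_eq_zero_of_not_mem hu]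

-- ===== VERDICT (by name: the statement is the Claim_ definition above) =====
theorem n_cluster_demand_dict_spec : Claim_equal_n_cluster_demand_dict := by
  intro n clusters _hDom hPre
  unfold Spec_n_cluster_demand_dict n_cluster_demand_dict n_cluster_demand_dict_alt
  show (clusters.foldl pvBodyA (pvInitDict n)).items.map (fun p => (p.1.1, p.1.2, p.2)) = _
  have hK := pv_keys_A n clusters hPre
  have hnd : (clusters.foldl pvBodyA (pvInitDict n)).keys.Nodup := hK ▸ pv_pairs_nodup n
  rw [PySem.Dict.items_eq_map_keys _ hnd 0, hK, List.map_map]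
  show (pvPairs n).map _ = _
  unfold pvPairs
  rw [List.map_flatMap]
  refine List.flatMap_congr ?_
  intro a _
  rw [List.map_map]
  refine List.map_congr_left fun b _ => ?_
  show (a, b, (clusters.foldl pvBodyA (pvInitDict n)).getD (a, b) 0)
      = (a, b, (clusters.foldl pvBodyB PySem.Dict.empty).getD (a, b) 0)
  rw [pv_foldl_getD_add clusters pvBodyA
      (fun c => if a ≠ b then (c.count a : Int) * (c.count b : Int) else 0) (a, b)
      (fun D c _ => pv_getD_A c D a b) (pvInitDict n),
    pv_foldl_getD_add clusters pvBodyB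
      (fun c => if a ≠ b then (c.count a : Int) * (c.count b : Int) else 0) (a, b)
      (fun D c _ => pv_getD_B c D a b) PySem.Dict.empty,
    pv_init_getD n (a, b), PySem.Dict.getD_empty]
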